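-- pv_equiv track=rewrite | github.com/gguerra1995/vectores_gabriel | main.py | cant_par_impar_primo
-- ===== SOURCE A (Python) =====
-- def cant_par_impar_primo(vector):
--     """Cuenta los pares,impares y primos de un vector."""
--     cant_par = 0
--     cant_impar = 0
--     cant_primo = 0
--     for v in vector:
--         if v % 2 == 0:
--             cant_par += 1
--         if v % 2 != 0:
--             cant_impar += 1
--         if es_primo(v):
--             cant_primo += 1
--     return cant_par, cant_impar, cant_primo
--
-- def es_primo(num):
--     """Valida si un numero es primo."""
--     for n in range(2, num):
--         if num % n == 0:
--             # No es primo
--             return False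
--     # Es primo
--     return True
-- ===== SOURCE B (Python) =====
-- def cant_par_impar_primo(vector):
--     """Cuenta los pares, impares y primos de un vector.
--
--     Distinta estrategia: conteos por countP/sum en una pasada cada uno y
--     primalidad por division de prueba solo hasta la raiz cuadrada
--     (misma convencion que A: todo num <= 2, incluidos negativos, cuenta como primo)."""
--     pares = sum(1 for v in vector if v % 2 == 0)
--     primos = sum(1 for v in vector if _es_primo_raiz(v))
--     return pares, len(vector) - pares, primos
--
-- def _es_primo_raiz(num):
--     if num <= 2:
--         return True
--     d = 2
--     while d * d <= num:
--         if num % d == 0: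
--             return False
--         d += 1
--     return True
-- ===== Notes on version B (the rewrite author's own statement) =====
-- stated objective: faster
-- what changed: Primality is tested by trial division only up to the square root instead of scanning all of range(2, num), and the even/odd/prime counters are computed as counts (odd = len - even) instead of one three-counter loop.
import Mathlib
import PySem

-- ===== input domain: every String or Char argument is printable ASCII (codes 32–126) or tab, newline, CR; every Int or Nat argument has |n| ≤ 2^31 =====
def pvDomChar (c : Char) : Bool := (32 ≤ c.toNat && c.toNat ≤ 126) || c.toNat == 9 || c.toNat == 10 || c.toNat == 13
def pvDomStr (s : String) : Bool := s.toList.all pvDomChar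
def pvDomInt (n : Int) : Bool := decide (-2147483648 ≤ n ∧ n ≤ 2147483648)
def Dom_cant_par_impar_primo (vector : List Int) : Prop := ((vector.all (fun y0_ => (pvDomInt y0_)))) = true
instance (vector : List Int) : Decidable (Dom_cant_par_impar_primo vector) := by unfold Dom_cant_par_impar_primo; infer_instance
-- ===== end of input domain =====

-- B replaces A's range(2,num) primality scan by trial division up to the square root
-- and computes the three counters as counts (odd = len - even).

-- ===== PORT A =====
-- es_primo: early-return loop over range(2, num)
def esPrimoLoop (num : Int) : List Int → Bool
  | [] => true
  | n :: rest => if PySem.Int.mod num n = 0 then false else esPrimoLoop num rest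

def esPrimo (num : Int) : Bool := esPrimoLoop num (PySem.List.pyRange 2 num 1)

def cant_par_impar_primo (vector : List Int) : List Int :=
  let s := vector.foldl (fun (acc : Int × Int × Int) v =>
    let acc1 := if PySem.Int.mod v 2 = 0 then (acc.1 + 1, acc.2.1, acc.2.2) else acc
    let acc2 := if PySem.Int.mod v 2 ≠ 0 then (acc1.1, acc1.2.1 + 1, acc1.2.2) else acc1
    if esPrimo v then (acc2.1, acc2.2.1, acc2.2.2 + 1) else acc2) (0, 0, 0)
  [s.1, s.2.1, s.2.2]

-- ===== PORT B =====
-- while d*d <= num loop of _es_primo_raiz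
def esPrimoRaizLoop (num d : Int) : Bool :=
  if _h : d * d ≤ num then
    (if PySem.Int.mod num d = 0 then false else esPrimoRaizLoop num (d + 1))
  else true
termination_by (num + 1 - d).toNat
decreasing_by
  have hd : d ≤ num := by
    by_cases h1 : 1 ≤ d
    · nlinarith
    · nlinarith [mul_self_nonneg d]
  omega

def esPrimoRaiz (num : Int) : Bool := if num ≤ 2 then true else esPrimoRaizLoop num 2

def cant_par_impar_primo_alt (vector : List Int) : List Int :=
  let pares : Int := vector.countP (fun v => PySem.Int.mod v 2 = 0)
  let primos : Int := vector.countP (fun v => esPrimoRaiz v)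
  [pares, (vector.length : Int) - pares, primos]

-- ===== PRECONDITION & SPEC =====
def Spec_cant_par_impar_primo (vector : List Int) (out : List Int) : Prop := out = cant_par_impar_primo_alt vector
instance (vector : List Int) (out : List Int) : Decidable (Spec_cant_par_impar_primo vector out) := by unfold Spec_cant_par_impar_primo; infer_instance

-- ===== CLAIM (what is proved, stated in full; the proofs are below) =====
def Claim_equal_cant_par_impar_primo : Prop := ∀ (vector : List Int), Dom_cant_par_impar_primo vector → Spec_cant_par_impar_primo vector (cant_par_impar_primo vector)

-- ===== LEMMAS AND PROOFS =====

lemma loopA_iff (num : Int) (l : List Int) :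
    esPrimoLoop num l = true ↔ ∀ n ∈ l, PySem.Int.mod num n ≠ 0 := by
  induction l with
  | nil => simp [esPrimoLoop]
  | cons n rest ih =>
    simp only [esPrimoLoop]
    split_ifs with h
    · simp [h]
    · simp [h, ih]

lemma esPrimo_iff (num : Int) :
    esPrimo num = true ↔ ∀ n : Int, 2 ≤ n → n < num → PySem.Int.mod num n ≠ 0 := by
  unfold esPrimo
  rw [loopA_iff]
  constructor
  · intro h n h2 hn
    exact h n (by rw [PySem.List.mem_pyRange_one]; exact ⟨h2, hn⟩)
  · intro h n hn
    rw [PySem.List.mem_pyRange_one] at hn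
    exact h n hn.1 hn.2

lemma loopB_aux (num : Int) (k : Nat) : ∀ d : Int, 2 ≤ d → (num + 1 - d).toNat ≤ k →
    (esPrimoRaizLoop num d = true ↔
      ∀ e : Int, d ≤ e → e * e ≤ num → PySem.Int.mod num e ≠ 0) := by
  induction k with
  | zero =>
    intro d hd hk
    have hdn : num < d := by omega
    have hguard : ¬ d * d ≤ num := by nlinarith
    rw [esPrimoRaizLoop, dif_neg hguard]
    simp only [true_iff]
    intro e hde he _
    nlinarith
  | succ k ih =>
    intro d hd hk
    rw [esPrimoRaizLoop]
    by_cases hg : d * d ≤ num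
    · have hdnum : d ≤ num := by nlinarith
      rw [dif_pos hg]
      by_cases hm : PySem.Int.mod num d = 0
      · rw [if_pos hm]
        constructor
        · intro h; simp at h
        · intro h; exact absurd hm (h d le_rfl hg)
      · rw [if_neg hm, ih (d + 1) (by omega) (by omega)]
        constructor
        · intro h e hde he
          rcases eq_or_lt_of_le hde with rfl | hlt
          · exact hm
          · exact h e (by omega) he
        · intro h e hde he
          exact h e (by omega) he
    · rw [dif_neg hg]
      simp only [true_iff]
      intro e hde he _
      nlinarith
  
lemma esPrimo_eq_esPrimoRaiz (num : Int) : esPrimo num = esPrimoRaiz num := by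
  unfold esPrimoRaiz
  split_ifs with h2
  · unfold esPrimo
    rw [PySem.List.pyRange_one_eq_nil h2]
    rfl
  · push_neg at h2
    have hA := esPrimo_iff num
    have hB := loopB_aux num (num + 1 - 2).toNat 2 le_rfl le_rfl
    rcases hb : esPrimoRaizLoop num 2 with _ | _
    · -- B false → A false
      rcases ha : esPrimo num with _ | _
      · rfl
      · exfalso
        rw [ha] at hA
        rw [hb] at hB
        have hAll := hA.mp rfl
        have hnot : ¬ (∀ e : Int, 2 ≤ e → e * e ≤ num → PySem.Int.mod num e ≠ 0) := by
          intro h; have := hB.mpr h; simp at this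
        apply hnot
        intro e h2e he
        have helt : e < num := by nlinarith
        exact hAll e h2e helt
    · -- B true → A true
      rw [hb] at hB
      have hsqrt := hB.mp rfl
      rw [hA]
      intro n h2n hn hmod
      have hdvd : n ∣ num := (PySem.Int.mod_eq_zero_iff_dvd num n).mp hmod
      obtain ⟨m, hm⟩ := hdvd
      have hnpos : (0:Int) < n := by omega
      have hm1 : 1 < m := by
        by_contra h
        push_neg at h
        have : n * m ≤ n * 1 := mul_le_mul_of_nonneg_left h (le_of_lt hnpos)
        rw [mul_one] at this
        omega
      by_cases hc : n * n ≤ num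
      · exact hsqrt n h2n hc hmod
      · push_neg at hc
        have hmn : m < n := by nlinarith
        have hmm : m * m ≤ num := by nlinarith
        apply hsqrt m (by omega) hmm
        rw [PySem.Int.mod_eq_zero_iff_dvd num m]
        exact ⟨n, by rw [hm, mul_comm]⟩

lemma foldA_eq (l : List Int) (a b c : Int) :
    l.foldl (fun (acc : Int × Int × Int) v =>
      let acc1 := if PySem.Int.mod v 2 = 0 then (acc.1 + 1, acc.2.1, acc.2.2) else acc
      let acc2 := if PySem.Int.mod v 2 ≠ 0 then (acc1.1, acc1.2.1 + 1, acc1.2.2) else acc1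
      if esPrimo v then (acc2.1, acc2.2.1, acc2.2.2 + 1) else acc2) (a, b, c)
    = (a + l.countP (fun v => PySem.Int.mod v 2 = 0),
       b + l.countP (fun v => PySem.Int.mod v 2 ≠ 0),
       c + l.countP (fun v => esPrimo v)) := by
  induction l generalizing a b c with
  | nil => simp
  | cons v rest ih =>
    have hcongr : ∀ l : List Int, l.countP (fun v => decide (PySem.Int.mod v 2 ≠ 0))
        = l.countP (fun v => !decide (PySem.Int.mod v 2 = 0)) :=
      fun l => List.countP_congr (fun x _ => by simp [decide_not])
    simp only [List.foldl_cons, List.countP_cons]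
    by_cases h1 : PySem.Int.mod v 2 = 0 <;> by_cases h3 : esPrimo v = true <;>
      simp only [h1, h3, ne_eq, not_true_eq_false, not_false_eq_true, if_true, if_false,
        ite_true, ite_false, decide_true, decide_false] <;>
      rw [ih] <;>
      simp only [Prod.mk.injEq, hcongr, decide_not] <;>
      refine ⟨by push_cast; ring, by push_cast; ring, by push_cast; ring⟩

lemma countP_odd_eq (vector : List Int) :
    (vector.countP (fun v => PySem.Int.mod v 2 ≠ 0) : Int)
      = (vector.length : Int) - vector.countP (fun v => PySem.Int.mod v 2 = 0) := by
  induction vector with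
  | nil => simp
  | cons v rest ih =>
    by_cases h : PySem.Int.mod v 2 = 0 <;> simp [List.countP_cons, h] at ih ⊢ <;> omega

-- ===== VERDICT (by name: the statement is the Claim_ definition above) =====
theorem cant_par_impar_primo_spec : Claim_equal_cant_par_impar_primo := by
  intro vector _
  unfold Spec_cant_par_impar_primo cant_par_impar_primo cant_par_impar_primo_alt
  simp only [foldA_eq, zero_add]
  have hprimo : vector.countP (fun v => esPrimo v) = vector.countP (fun v => esPrimoRaiz v) :=
    List.countP_congr (fun v _ => by rw [esPrimo_eq_esPrimoRaiz])
  rw [hprimo, countP_odd_eq vector]
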